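-- pv_equiv track=rewrite | github.com/mkualquiera/HueLogo | std.py | extract_literal
-- ===== SOURCE A (Python) =====
-- def extract_literal(env,args):
--     word = ""
--     rest = ""
--     for i,char in enumerate(args):
--         if str.isspace(char):
--             if word != "":
--                 rest = args[i+1:]
--                 break
--         else:
--             word += char
--     return word, rest
-- ===== SOURCE B (Python) =====
-- def extract_literal(env, args):
--     stripped = args.lstrip()
--     parts = stripped.split(maxsplit=1)
--     word = parts[0] if parts else ""
--     if len(word) == len(stripped):
--         return word, ""
--     cut = len(args) - len(stripped) + len(word) + 1
--     return word, args[cut:]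
-- ===== Notes on version B (the rewrite author's own statement) =====
-- stated objective: simpler
-- what changed: Replaces A's indexed char-by-char word accumulation (with break-flag logic) by lstrip to drop leading whitespace, split(maxsplit=1) to take the word, and one arithmetic slice of args for the rest.
import Mathlib
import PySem

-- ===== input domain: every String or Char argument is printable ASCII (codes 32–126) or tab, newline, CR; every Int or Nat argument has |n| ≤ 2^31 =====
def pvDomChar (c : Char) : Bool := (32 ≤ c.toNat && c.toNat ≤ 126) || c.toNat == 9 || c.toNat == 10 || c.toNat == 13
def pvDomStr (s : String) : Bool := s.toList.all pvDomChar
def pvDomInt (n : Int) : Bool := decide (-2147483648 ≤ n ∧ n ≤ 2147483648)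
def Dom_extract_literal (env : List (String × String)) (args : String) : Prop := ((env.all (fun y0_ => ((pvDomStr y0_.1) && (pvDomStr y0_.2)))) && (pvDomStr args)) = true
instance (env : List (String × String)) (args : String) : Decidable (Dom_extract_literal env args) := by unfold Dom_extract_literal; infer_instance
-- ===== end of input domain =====

-- B replaces A's indexed char-by-char word accumulation by lstrip + split(maxsplit=1) for the word and one arithmetic slice of args for the rest; objective: simpler.


-- ===== PORT A =====
-- A's for-loop with its break: structural recursion over the remaining chars,
-- carrying the enumerate index i and the accumulated word; rest = args[i+1:] on break
def extractLoopA (argsL : List Char) : List Char → Nat → List Char → List Char × List Char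
  | [], _, word => (word, [])
  | c :: cs, i, word =>
    if PySem.Chars.isspace c then
      if word ≠ [] then (word, PySem.List.slice argsL (some ((i : Int) + 1)) none)
      else extractLoopA argsL cs (i + 1) word
    else extractLoopA argsL cs (i + 1) (word ++ [c])

def extract_literal (env : List (String × String)) (args : String) : String × String :=
  let p := extractLoopA args.toList args.toList 0 []
  (String.ofList p.1, String.ofList p.2)

-- ===== PORT B =====
-- Source B: stripped = args.lstrip(); parts = stripped.split(maxsplit=1);
-- word = parts[0] if parts else ""; then either (word, "") or (word, args[cut:])
def extract_literal_alt (env : List (String × String)) (args : String) : String × String :=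
  let stripped := PySem.Str.lstrip args
  let parts := PySem.Str.split₀Max stripped 1
  let word := if parts ≠ [] then PySem.List.pyGetD parts 0 "" else ""
  if PySem.Str.len word = PySem.Str.len stripped then (word, "")
  else
    let cut := PySem.Str.len args - PySem.Str.len stripped + PySem.Str.len word + 1
    (word, PySem.Str.slice args (some cut) none)

-- ===== PRECONDITION & SPEC =====
def Spec_extract_literal (env : List (String × String)) (args : String) (out : String × String) : Prop := out = extract_literal_alt env args
instance (env : List (String × String)) (args : String) (out : String × String) : Decidable (Spec_extract_literal env args out) := by unfold Spec_extract_literal; infer_instance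

-- ===== CLAIM (what is proved, stated in full; the proofs are below) =====
def Claim_equal_extract_literal : Prop := ∀ (env : List (String × String)) (args : String), Dom_extract_literal env args → Spec_extract_literal env args (extract_literal env args)

-- ===== LEMMAS AND PROOFS =====

-- Phase 1: while word = [], A's loop just skips whitespace characters
lemma extractLoopA_skip_spaces (argsL : List Char) (sp : List Char)
    (hsp : ∀ c ∈ sp, PySem.Chars.isspace c = true) :
    ∀ (t : List Char) (i : Nat),
      extractLoopA argsL (sp ++ t) i [] = extractLoopA argsL t (i + sp.length) [] := by
  induction sp with
  | nil => intro t i; simp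
  | cons c cs ih =>
      intro t i
      have hc : PySem.Chars.isspace c = true := hsp c (by simp)
      simp only [List.cons_append, extractLoopA, hc, if_true, ne_eq, not_true_eq_false,
        if_false]
      rw [ih (fun c hc => hsp c (by simp [hc])) t (i + 1)]
      congr 1
      simp [List.length_cons]; omega

-- Phase 2 closed form: once word = w ≠ [], A's loop on the remaining chars u starting
-- at index i returns (w ++ nonspace-prefix of u, drop past the first space) resp. (w ++ u, [])
lemma extractLoopA_closed (argsL : List Char) :
    ∀ (u : List Char) (i : Nat) (w : List Char), w ≠ [] →
      extractLoopA argsL u i w =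
        if (u.takeWhile (fun c => !PySem.Chars.isspace c)).length < u.length
        then (w ++ u.takeWhile (fun c => !PySem.Chars.isspace c),
              argsL.drop (i + (u.takeWhile (fun c => !PySem.Chars.isspace c)).length + 1))
        else (w ++ u, []) := by
  intro u
  induction u with
  | nil => intro i w hw; simp [extractLoopA]
  | cons c cs ih =>
      intro i w hw
      by_cases hc : PySem.Chars.isspace c = true
      · have htw : (c :: cs).takeWhile (fun x => !PySem.Chars.isspace x) = [] := by
          simp [List.takeWhile_cons, hc]
        rw [htw]
        simp only [extractLoopA, hc, if_true, ne_eq, hw, not_false_eq_true, if_pos,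
          List.length_nil, List.length_cons, Nat.zero_lt_succ, List.append_nil,
          Nat.add_zero]
        have hcast : ((i : Nat) : Int) + 1 = ((i + 1 : Nat) : Int) := by push_cast; ring
        rw [hcast, PySem.List.slice_from_natCast]
      · have hc' : PySem.Chars.isspace c = false := by simpa using hc
        have htw : (c :: cs).takeWhile (fun x => !PySem.Chars.isspace x)
            = c :: cs.takeWhile (fun x => !PySem.Chars.isspace x) := by
          simp [List.takeWhile_cons, hc']
        rw [htw]
        simp only [extractLoopA, hc', Bool.false_eq_true, if_false]
        rw [ih (i + 1) (w ++ [c]) (by simp)]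
        by_cases hlt : (cs.takeWhile (fun c => !PySem.Chars.isspace c)).length < cs.length
        · rw [if_pos hlt, if_pos (by simpa using Nat.succ_lt_succ hlt)]
          simp only [Prod.mk.injEq]
          refine ⟨by simp, ?_⟩
          congr 1
          simp only [List.length_cons]
          omega
        · rw [if_neg hlt, if_neg (by simp only [List.length_cons]; omega)]
          have : cs.takeWhile (fun x => !PySem.Chars.isspace x) = cs :=
            (List.takeWhile_prefix _).eq_of_length
              (le_antisymm (List.takeWhile_prefix _).length_le (le_of_not_gt hlt))
          simp [this]

-- head of the stripped string is not whitespace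
lemma dropWhile_head_false (p : Char → Bool) (L : List Char) (c : Char) (cs : List Char)
    (h : L.dropWhile p = c :: cs) : p c = false := by
  have hne : L.dropWhile p ≠ [] := by simp [h]
  have := List.head_dropWhile_not p hne
  simpa [h] using this

-- A's whole loop: word = nonspace prefix of the stripped chars st, rest by a drop past
-- the first space (index written against the original list L)
lemma extractLoopA_closed_form (L : List Char) :
    extractLoopA L L 0 [] =
      (let st := L.dropWhile PySem.Chars.isspace
       let tk := st.takeWhile (fun c => !PySem.Chars.isspace c)
       (tk, if tk.length < st.length
            then L.drop (L.length - st.length + tk.length + 1) else [])) := by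
  have hsplit : L = L.takeWhile PySem.Chars.isspace ++ L.dropWhile PySem.Chars.isspace :=
    (List.takeWhile_append_dropWhile).symm
  have hsp : ∀ c ∈ L.takeWhile PySem.Chars.isspace, PySem.Chars.isspace c = true := by
    intro c hc; exact List.mem_takeWhile_imp hc
  have hlen : (L.takeWhile PySem.Chars.isspace).length =
      L.length - (L.dropWhile PySem.Chars.isspace).length := by
    have h1 := congrArg List.length hsplit
    simp only [List.length_append] at h1; omega
  have hstlen : (L.dropWhile PySem.Chars.isspace).length ≤ L.length :=
    List.length_dropWhile_le _ _
  have h1 : extractLoopA L L 0 [] =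
      extractLoopA L (L.dropWhile PySem.Chars.isspace)
        (0 + (L.takeWhile PySem.Chars.isspace).length) [] := by
    nth_rewrite 2 [hsplit]
    exact extractLoopA_skip_spaces L _ hsp _ 0
  rw [h1]
  simp only [Nat.zero_add, hlen]
  cases hst : L.dropWhile PySem.Chars.isspace with
  | nil => simp [extractLoopA]
  | cons c cs =>
      have hc : PySem.Chars.isspace c = false := dropWhile_head_false _ L c cs hst
      rw [hst] at hstlen
      simp only [extractLoopA, hc, Bool.false_eq_true, if_false, List.nil_append]
      rw [extractLoopA_closed L cs (L.length - (c :: cs).length + 1) [c] (by simp)]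
      have htw : (c :: cs).takeWhile (fun x => !PySem.Chars.isspace x)
          = c :: cs.takeWhile (fun x => !PySem.Chars.isspace x) := by
        simp [List.takeWhile_cons, hc]
      rw [htw]
      by_cases hlt : (cs.takeWhile (fun c => !PySem.Chars.isspace c)).length < cs.length
      · rw [if_pos hlt, if_pos (by simpa using Nat.succ_lt_succ hlt)]
        simp only [Prod.mk.injEq, List.singleton_append]
        refine ⟨trivial, ?_⟩
        congr 1
        simp only [List.length_cons] at hstlen ⊢
        omega
      · rw [if_neg hlt, if_neg (by simp only [List.length_cons]; omega)]
        have : cs.takeWhile (fun x => !PySem.Chars.isspace x) = cs :=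
          (List.takeWhile_prefix _).eq_of_length
            (le_antisymm (List.takeWhile_prefix _).length_le (le_of_not_gt hlt))
        simp [this]

-- first element of stripped.split(maxsplit=1): the nonspace prefix (stripped head not a space)
lemma split₀Max_one_head (c : Char) (cs : List Char) (h : PySem.Chars.isspace c = false) :
    (PySem.Chars.split₀Max (c :: cs) 1).headD [] =
        (c :: cs).takeWhile (fun x => !PySem.Chars.isspace x) ∧
      PySem.Chars.split₀Max (c :: cs) 1 ≠ [] := by
  unfold PySem.Chars.split₀Max
  simp only [show ¬((1:Int) < 0) by omega, if_false, Int.toNat_one, List.length_cons]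
  rw [show cs.length + 1 + 1 = (cs.length + 1) + 1 from rfl]
  rw [PySem.Chars.split₀Max.go]
  simp only [List.dropWhile_cons, h, Bool.false_eq_true, if_false]
  rw [PySem.Chars.split₀Max.go.eq_def]
  cases hfuel : cs.length + 1 with
  | zero => omega
  | succ n =>
    cases hd2 : List.dropWhile PySem.Chars.isspace
        (List.dropWhile (fun c => !PySem.Chars.isspace c) cs) <;> simp [hd2]

lemma lstrip_toList (s : String) :
    (PySem.Str.lstrip s).toList = s.toList.dropWhile PySem.Chars.isspace := by
  have h1 : (PySem.Str.lstrip s).toList = PySem.Chars.lstrip s.toList := by simp [pysem]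
  rw [h1]; simp [PySem.Chars.lstrip]

-- B's word equals the nonspace prefix of the stripped chars
lemma alt_word_eq (args : String) :
    (let parts := PySem.Str.split₀Max (PySem.Str.lstrip args) 1
     if parts ≠ [] then PySem.List.pyGetD parts 0 "" else "") =
      String.ofList ((args.toList.dropWhile PySem.Chars.isspace).takeWhile
        (fun c => !PySem.Chars.isspace c)) := by
  have hparts : PySem.Str.split₀Max (PySem.Str.lstrip args) 1 =
      (PySem.Chars.split₀Max (args.toList.dropWhile PySem.Chars.isspace) 1).map
        String.ofList := by
    unfold PySem.Str.split₀Max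
    rw [lstrip_toList]
  cases hst : args.toList.dropWhile PySem.Chars.isspace with
  | nil =>
      simp only [hparts, hst]
      have : PySem.Chars.split₀Max [] 1 = [] := by decide
      simp [this]
  | cons c cs =>
      have hc : PySem.Chars.isspace c = false := dropWhile_head_false _ args.toList c cs hst
      obtain ⟨hhead, hne⟩ := split₀Max_one_head c cs hc
      cases hS : PySem.Chars.split₀Max (c :: cs) 1 with
      | nil => exact absurd hS hne
      | cons p ps =>
          have hp : p = (c :: cs).takeWhile (fun x => !PySem.Chars.isspace x) := by
            simpa [hS] using hhead
          simp [hparts, hst, hS, PySem.List.pyGetD_zero_cons, hp]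
  -- (both branches rewrite parts to the mapped Chars-level split)

-- ===== VERDICT (by name: the statement is the Claim_ definition above) =====
theorem extract_literal_spec : Claim_equal_extract_literal := by
  intro env args _
  unfold Spec_extract_literal extract_literal extract_literal_alt
  rw [extractLoopA_closed_form]
  dsimp only
  have hword := alt_word_eq args
  simp only at hword
  rw [hword]
  set st := args.toList.dropWhile PySem.Chars.isspace with hst
  set tk := st.takeWhile (fun c => !PySem.Chars.isspace c) with htk
  have htkle : tk.length ≤ st.length := (List.takeWhile_prefix _).length_le
  have hstle : st.length ≤ args.toList.length := by
    rw [hst]; exact List.length_dropWhile_le _ _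
  have hlenw : PySem.Str.len (String.ofList tk) = (tk.length : Int) := by
    simp [PySem.Str.len]
  have hlens : PySem.Str.len (PySem.Str.lstrip args) = (st.length : Int) := by
    rw [PySem.Str.len_eq, lstrip_toList]
  by_cases hlt : tk.length < st.length
  · have hne : ¬ PySem.Str.len (String.ofList tk) = PySem.Str.len (PySem.Str.lstrip args) := by
      rw [hlenw, hlens]; exact_mod_cast Nat.ne_of_lt hlt
    rw [if_pos hlt, if_neg hne]
    refine Prod.ext ?_ ?_
    · rfl
    · -- rest: drop (len L - len st + len tk + 1) = args[cut:]
      have hcut : PySem.Str.len args - PySem.Str.len (PySem.Str.lstrip args)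
            + PySem.Str.len (String.ofList tk) + 1 =
          ((args.toList.length - st.length + tk.length + 1 : Nat) : Int) := by
        rw [hlenw, hlens, PySem.Str.len_eq]; push_cast [Nat.cast_sub hstle]; ring
      unfold PySem.Str.slice
      rw [hcut]
      congr 1
      simp only [PySem.Chars.slice_eq_listSlice]
      rw [PySem.List.slice_from_natCast]
  · have heq : PySem.Str.len (String.ofList tk) = PySem.Str.len (PySem.Str.lstrip args) := by
      rw [hlenw, hlens]
      have : tk.length = st.length := le_antisymm htkle (le_of_not_gt hlt)
      exact_mod_cast this
    rw [if_neg hlt, if_pos heq]
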